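-- pv_equiv track=rewrite | github.com/tezeladata/Group-zero-and-extra | codewars/Python/extra_kata7.py | remove_smallest
-- ===== SOURCE A (Python) =====
-- def remove_smallest(numbers):
--     new=[]
--     for x in numbers:
--         new.append(x)
--     if len(numbers)==0:
--         return []
--     else:
--         new.remove(min(new))
--         return new
-- ===== SOURCE B (Python) =====
-- def remove_smallest(numbers):
--     if not numbers:
--         return []
--     best_i, best = 0, numbers[0]
--     for i, x in enumerate(numbers):
--         if x < best:
--             best_i, best = i, x
--     return [x for i, x in enumerate(numbers) if i != best_i]
-- ===== Notes on version B (the rewrite author's own statement) =====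
-- stated objective: alternative
-- what changed: B replaces the copy + min() + list.remove() of A by one argmin scan over enumerate (tracking the index of the first minimum) followed by an index-filtering rebuild, never mutating a list.
import Mathlib
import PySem

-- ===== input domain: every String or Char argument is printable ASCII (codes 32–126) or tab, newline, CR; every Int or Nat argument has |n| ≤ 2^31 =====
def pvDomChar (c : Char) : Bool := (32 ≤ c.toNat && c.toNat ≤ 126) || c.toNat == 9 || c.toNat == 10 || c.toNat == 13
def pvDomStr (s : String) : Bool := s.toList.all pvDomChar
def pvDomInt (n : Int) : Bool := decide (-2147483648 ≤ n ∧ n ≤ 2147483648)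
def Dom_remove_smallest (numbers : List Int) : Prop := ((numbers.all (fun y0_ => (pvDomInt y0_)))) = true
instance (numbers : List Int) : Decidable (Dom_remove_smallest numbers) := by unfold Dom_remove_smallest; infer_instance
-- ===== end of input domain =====

-- B replaces copy + min() + list.remove() by one argmin scan over enumerate plus an index-filtering rebuild; same O(n) cost, no mutation.

-- ===== PORT A =====
-- A: copy the list element by element, then (if nonempty) new.remove(min(new)).
-- min() and remove() never fail here (new is nonempty and min ∈ new), so the 'none' branches are unreachable.
def remove_smallest (numbers : List Int) : List Int :=
  let new := numbers.foldl (fun acc x => acc ++ [x]) []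
  if numbers.length = 0 then []
  else
    match PySem.List.min? new (fun y => y) with
    | none => []
    | some m =>
      match PySem.List.remove? new m with
      | none => []
      | some r => r

-- ===== PORT B =====
-- B: argmin scan with state (best_i, best) over enumerate, then keep elements whose index ≠ best_i.
def remove_smallest_alt (numbers : List Int) : List Int :=
  match numbers with
  | [] => []
  | h :: _ =>
    let st := (PySem.List.enumerate numbers 0).foldl
      (fun (st : Int × Int) (p : Int × Int) => if p.2 < st.2 then (p.1, p.2) else st) (0, h)
    (PySem.List.enumerate numbers 0).filterMap
      (fun p => if p.1 ≠ st.1 then some p.2 else none)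

-- ===== PRECONDITION & SPEC =====
def Spec_remove_smallest (numbers : List Int) (out : List Int) : Prop := out = remove_smallest_alt numbers
instance (numbers : List Int) (out : List Int) : Decidable (Spec_remove_smallest numbers out) := by unfold Spec_remove_smallest; infer_instance

-- ===== CLAIM (what is proved, stated in full; the proofs are below) =====
def Claim_equal_remove_smallest : Prop := ∀ (numbers : List Int), Dom_remove_smallest numbers → Spec_remove_smallest numbers (remove_smallest numbers)

-- ===== LEMMAS AND PROOFS =====

-- The argmin fold: final best value is xs.foldl min bv; if it beats bv, the index is s + first index of it.
theorem argmin_fold (xs : List Int) (s bi bv : Int) :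
    (PySem.List.enumerate xs s).foldl
      (fun (st : Int × Int) (p : Int × Int) => if p.2 < st.2 then (p.1, p.2) else st) (bi, bv)
    = if xs.foldl min bv < bv then ((s + (xs.idxOf (xs.foldl min bv) : Int)), xs.foldl min bv)
      else (bi, bv) := by
  induction xs generalizing s bi bv with
  | nil => simp
  | cons x t ih =>
    simp only [PySem.List.enumerate_cons, List.foldl_cons, List.foldl]
    by_cases hx : x < bv
    · simp only [hx, if_true]
      rw [ih]
      have hmx : t.foldl min x ≤ x := (PySem.List.foldl_min_le t x).1
      have hmin : min bv x = x := by omega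
      rw [hmin]
      by_cases hm : t.foldl min x < x
      · have hne : x ≠ t.foldl min x := by omega
        have hlt : t.foldl min x < bv := by omega
        simp only [hm, if_true, hlt, List.idxOf_cons_ne t hne, Prod.mk.injEq, Nat.cast_succ]
        constructor
        · omega
        · trivial
      · have hx' : t.foldl min x = x := by omega
        simp only [hx', hx, if_true]
        simp [List.idxOf_cons_self]
    · simp only [hx, if_false]
      rw [ih]
      have hmin : min bv x = bv := by omega
      rw [hmin]
      by_cases hm : t.foldl min bv < bv
      · have hne : x ≠ t.foldl min bv := by omega
        simp only [hm, if_true, List.idxOf_cons_ne t hne, Prod.mk.injEq, Nat.cast_succ]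
        constructor
        · omega
        · trivial
      · simp [hm]

-- Filtering enumerate by a too-small index keeps everything.
theorem enumFilter_all (t : List Int) (s b : Int) (h : b < s) :
    (PySem.List.enumerate t s).filterMap (fun p => if p.1 ≠ b then some p.2 else none) = t := by
  induction t generalizing s with
  | nil => simp
  | cons x r ih =>
    have hne : s ≠ b := by omega
    simp only [PySem.List.enumerate_cons, List.filterMap_cons, hne, ne_eq, not_false_iff, if_true]
    rw [ih (s + 1) (by omega)]

-- Filtering enumerate by index s+k erases the k-th element.
theorem enumFilter (xs : List Int) (s : Int) (k : Nat) :
    (PySem.List.enumerate xs s).filterMap (fun p => if p.1 ≠ s + (k : Int) then some p.2 else none)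
    = xs.eraseIdx k := by
  induction xs generalizing s k with
  | nil => simp
  | cons x t ih =>
    cases k with
    | zero =>
      simp only [PySem.List.enumerate_cons, List.filterMap_cons, Nat.cast_zero, add_zero,
        ne_eq, not_true_eq_false, if_false, List.eraseIdx_cons_zero]
      exact enumFilter_all t (s + 1) s (by omega)
    | succ j =>
      have hne : s ≠ s + ((j : Int) + 1) := by omega
      simp only [PySem.List.enumerate_cons, List.filterMap_cons, Nat.cast_succ, hne, ne_eq,
        not_false_iff, if_true, List.eraseIdx_cons_succ]
      have : s + ((j : Int) + 1) = (s + 1) + (j : Int) := by omega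
      rw [this, ih (s + 1) j]

-- A computes erase of the running minimum.
theorem portA_eq_erase (h : Int) (t : List Int) :
    remove_smallest (h :: t) = (h :: t).erase (t.foldl min h) := by
  unfold remove_smallest
  rw [PySem.List.foldl_append_singleton]
  simp only [List.nil_append, List.length_cons, Nat.succ_ne_zero, if_false]
  rw [PySem.List.min?_id_cons]
  have hmem : t.foldl min h ∈ h :: t := by
    rcases PySem.List.foldl_min_mem t h with hh | ht
    · rw [hh]; exact List.mem_cons_self
    · exact List.mem_cons_of_mem _ ht
  simp only [PySem.List.remove?_eq_some_erase _ _ hmem]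

-- B's chosen index is the first index of the minimum.
theorem portB_eq_eraseIdx (h : Int) (t : List Int) :
    remove_smallest_alt (h :: t) = (h :: t).eraseIdx ((h :: t).idxOf (t.foldl min h)) := by
  unfold remove_smallest_alt
  simp only
  rw [argmin_fold (h :: t) 0 0 h]
  have hfold : (h :: t).foldl min h = t.foldl min h := by simp [List.foldl]
  rw [hfold]
  have hst : (if t.foldl min h < h
        then ((0 + (((h :: t).idxOf (t.foldl min h) : Nat) : Int)), t.foldl min h)
        else ((0 : Int), h)).1
      = (((h :: t).idxOf (t.foldl min h) : Nat) : Int) := by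
    by_cases hm : t.foldl min h < h
    · simp [hm]
    · have hval : t.foldl min h = h := by
        have := (PySem.List.foldl_min_le t h).1; omega
      simp [hval, List.idxOf_cons_self]
  simp only [hst]
  simpa using enumFilter (h :: t) 0 ((h :: t).idxOf (t.foldl min h))

-- ===== VERDICT (by name: the statement is the Claim_ definition above) =====
theorem remove_smallest_spec : Claim_equal_remove_smallest := by
  intro numbers _
  unfold Spec_remove_smallest
  match numbers with
  | [] => rfl
  | h :: t =>
    rw [portA_eq_erase, portB_eq_eraseIdx]
    exact List.erase_eq_eraseIdx_of_idxOf rfl
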